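-- pv_equiv track=rewrite | github.com/mkallipo/affiliation-matching | functions_cluster.py | str_radius_u
-- ===== SOURCE A (Python) =====
-- def str_radius_u(string, radius_u):
--     str_list = string.split()
--     indices = []
--     result = []
--
--     for i, x in enumerate(str_list):
--         if 'univers' in x:
--             indices.append(i)
--
--     for r0 in indices:
--         lmin =max(0,r0-radius_u)
--         lmax =min(r0+radius_u, len(str_list))
--         s = str_list[lmin:lmax+1]
--
--         result.append(' '.join(s))
--
--     return result
-- ===== SOURCE B (Python) =====
-- def str_radius_u(string, radius_u):
--     # Streaming sliding-window pass: a back-buffer of the last radius_u words and a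
--     # queue of open windows that collect future words; no index lists, no slicing.
--     result = []
--     back = []          # the last radius_u words seen before the current word
--     open_wins = []     # (words still needed, parts collected so far) per pending match
--     for w in string.split():
--         still = []
--         for need, parts in open_wins:
--             parts.append(w)
--             if need > 1:
--                 still.append((need - 1, parts))
--             else:
--                 result.append(' '.join(parts))
--         open_wins = still
--         if 'univers' in w:
--             if radius_u > 0:
--                 open_wins.append((radius_u, back + [w]))
--             else:
--                 result.append(w)
--         back.append(w)
--         if len(back) > radius_u:
--             back.pop(0)
--     for need, parts in open_wins:
--         result.append(' '.join(parts))
--     return result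
-- ===== Notes on version B (the rewrite author's own statement) =====
-- stated objective: alternative
-- what changed: Replaces A's two staged passes (collect match indices, then slice a window around each index) by a single streaming pass that keeps a sliding back-buffer of the last radius_u words and a queue of open windows collecting future words, with no index list and no slicing.
-- outside the precondition, e.g. on str_radius_u('aa univers bb cc dd ee', -3): A returns ['dd'], B returns ['univers']
import Mathlib
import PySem

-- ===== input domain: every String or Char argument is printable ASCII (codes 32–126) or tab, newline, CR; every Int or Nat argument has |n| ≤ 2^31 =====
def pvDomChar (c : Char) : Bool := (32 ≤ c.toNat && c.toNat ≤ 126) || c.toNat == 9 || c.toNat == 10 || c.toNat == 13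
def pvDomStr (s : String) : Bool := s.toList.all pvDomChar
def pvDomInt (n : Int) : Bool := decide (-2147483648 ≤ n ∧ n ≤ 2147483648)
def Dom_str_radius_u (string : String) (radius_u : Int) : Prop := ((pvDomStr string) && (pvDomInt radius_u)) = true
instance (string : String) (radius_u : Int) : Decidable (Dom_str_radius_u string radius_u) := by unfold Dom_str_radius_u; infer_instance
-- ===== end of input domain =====

-- B replaces A's index-list + slicing passes by one streaming pass with a sliding back-buffer and a queue of open windows (alternative algorithm, same cost).
-- Pre_ excludes negative radius_u, where A's window comes from Python negative-slice wraparound (an accidental value); B returns the matched word alone there.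


-- ===== PORT A =====
def str_radius_u (string : String) (radius_u : Int) : List String :=
  let strList := PySem.Str.split₀ string
  let indices := (PySem.List.enumerate strList 0).foldl
    (fun acc p => if PySem.Str.isIn "univers" p.2 then acc ++ [p.1] else acc) []
  indices.foldl (fun result r0 =>
    let lmin := max 0 (r0 - radius_u)
    let lmax := min (r0 + radius_u) (strList.length : Int)
    let s := PySem.List.slice strList (some lmin) (some (lmax + 1))
    result ++ [PySem.Str.join " " s]) []

-- ===== PORT B =====
-- one loop iteration of B: close/extend the open windows with w, maybe open a window, slide the back-buffer
def stepB (radius_u : Int) (st : List String × List String × List (Int × List String)) (w : String) :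
    List String × List String × List (Int × List String) :=
  let result := st.1
  let back := st.2.1
  let opens := st.2.2
  let sr := opens.foldl
    (fun (acc : List (Int × List String) × List String) p =>
      let parts := p.2 ++ [w]
      if 1 < p.1 then (acc.1 ++ [(p.1 - 1, parts)], acc.2)
      else (acc.1, acc.2 ++ [PySem.Str.join " " parts])) ([], [])
  let result := result ++ sr.2
  let opens := sr.1
  let rop :=
    if PySem.Str.isIn "univers" w then
      if 0 < radius_u then (result, opens ++ [(radius_u, back ++ [w])])
      else (result ++ [w], opens)
    else (result, opens)
  let back2 := back ++ [w]
  let back3 := if radius_u < (back2.length : Int) then back2.drop 1 else back2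
  (rop.1, back3, rop.2)

def str_radius_u_alt (string : String) (radius_u : Int) : List String :=
  let fin := (PySem.Str.split₀ string).foldl (stepB radius_u) ([], [], [])
  fin.1 ++ fin.2.2.map (fun p => PySem.Str.join " " p.2)

-- ===== PRECONDITION & SPEC =====
-- Pre_ excludes only negative radius_u combined with a string that actually contains a matching word: there A's slice bound
-- min(i+radius_u,n)+1 can go negative and Python's negative-slice wraparound yields an accidental window
-- (e.g. ("aa univers bb cc dd ee", -3) ↦ ['dd']); B returns ['univers'] there. Without a match both return [] at any radius.
def Pre_str_radius_u (string : String) (radius_u : Int) : Prop :=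
  0 ≤ radius_u ∨ ∀ w ∈ PySem.Str.split₀ string, PySem.Str.isIn "univers" w = false
instance (string : String) (radius_u : Int) : Decidable (Pre_str_radius_u string radius_u) := by unfold Pre_str_radius_u; infer_instance
def pvWitness_str_radius_u : String × Int := ("the univers is big", 1)

def Spec_str_radius_u (string : String) (radius_u : Int) (out : List String) : Prop := out = str_radius_u_alt string radius_u
instance (string : String) (radius_u : Int) (out : List String) : Decidable (Spec_str_radius_u string radius_u out) := by unfold Spec_str_radius_u; infer_instance

-- ===== CLAIM (what is proved, stated in full; the proofs are below) =====
def Claim_equal_str_radius_u : Prop := ∀ (string : String) (radius_u : Int), Dom_str_radius_u string radius_u → Pre_str_radius_u string radius_u → Spec_str_radius_u string radius_u (str_radius_u string radius_u)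

-- ===== LEMMAS AND PROOFS =====
def mWc (ws : List String) (i : Nat) : Bool := PySem.Str.isIn "univers" (ws.getD i "")
def winN (ws : List String) (rn i : Nat) : String :=
  PySem.Str.join " " ((ws.drop (i - rn)).take (min (i + rn) ws.length + 1 - (i - rn)))
def resS (ws : List String) (rn k : Nat) : List String :=
  ((List.range k).filter (fun i => mWc ws i && decide (i + rn < k))).map (winN ws rn)
def openS (ws : List String) (rn k : Nat) : List (Int × List String) :=
  ((List.range k).filter (fun i => mWc ws i && decide (k ≤ i + rn))).map
    (fun (i : Nat) =>
      let lo : Nat := i - rn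
      ((rn : Int) - (k : Int) + 1 + (i : Int), (ws.drop lo).take (k - lo)))
def backS (ws : List String) (rn k : Nat) : List String := (ws.drop (k - rn)).take (k - (k - rn))

lemma inner_fold (w : String) (l : List (Int × List String)) (a : List (Int × List String)) (b : List String) :
  l.foldl (fun acc p =>
      let parts := p.2 ++ [w]
      if 1 < p.1 then (acc.1 ++ [(p.1 - 1, parts)], acc.2)
      else (acc.1, acc.2 ++ [PySem.Str.join " " parts])) (a, b)
  = (a ++ (l.filter (fun p => decide (1 < p.1))).map (fun p => (p.1 - 1, p.2 ++ [w])),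
     b ++ (l.filter (fun p => !decide (1 < p.1))).map (fun p => PySem.Str.join " " (p.2 ++ [w]))) := by
  induction l generalizing a b with
  | nil => simp
  | cons x l ih => by_cases h : 1 < x.1 <;> simp [h, ih]

lemma take_append_getD {α : Type} (d : α) (xs : List α) (a b : Nat) (hab : a ≤ b) (hb : b < xs.length) :
  (xs.drop a).take (b - a) ++ [xs.getD b d] = (xs.drop a).take (b + 1 - a) := by
  have h1 : b + 1 - a = (b - a) + 1 := by omega
  rw [h1, List.take_add_one]
  have h2 : (xs.drop a)[b - a]? = some (xs.getD b d) := by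
    rw [List.getElem?_drop]
    have h3 : a + (b - a) = b := by omega
    rw [h3, List.getElem?_eq_getElem hb]
    simp [List.getD_eq_getElem?_getD, List.getElem?_eq_getElem hb]
  simp [h2]

lemma filter_split_mono (l : List Nat) (hl : l.Pairwise (· < ·)) (q p : Nat → Bool)
    (hp : ∀ a b : Nat, a ≤ b → p b = true → p a = true) :
    l.filter q = l.filter (fun i => q i && p i) ++ l.filter (fun i => q i && !p i) := by
  induction l with
  | nil => simp
  | cons x l ih =>
    have hx := (List.pairwise_cons.mp hl).1
    have hl' := (List.pairwise_cons.mp hl).2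
    by_cases hpx : p x = true
    · by_cases hqx : q x = true <;> simp [hpx, hqx, ih hl']
    · have h0 : l.filter (fun i => q i && p i) = [] := by
        apply List.filter_eq_nil_iff.mpr
        intro b hb
        have hpb : ¬ p b = true := fun h => hpx (hp x b (le_of_lt (hx b hb)) h)
        simp [hpb]
      by_cases hqx : q x = true <;> simp [hpx, hqx, ih hl', h0]

lemma range_filter_cons (w : String) (ws : List String) :
    (List.range (ws.length + 1)).filter (mWc (w :: ws))
    = (if mWc (w :: ws) 0 then [0] else []) ++ ((List.range ws.length).filter (mWc ws)).map (fun i => i + 1) := by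
  have htail : ((List.range ws.length).map Nat.succ).filter (mWc (w :: ws))
      = ((List.range ws.length).filter (mWc ws)).map (fun i => i + 1) := by
    rw [List.filter_map]
    have : ((List.range ws.length).filter (mWc (w :: ws) ∘ Nat.succ))
        = (List.range ws.length).filter (mWc ws) := by
      apply List.filter_congr
      intro i _
      simp [mWc, Function.comp]
    rw [this]
  rw [List.range_succ_eq_map, List.filter_cons, htail]
  split <;> simp

lemma enum_matches (ws : List String) (s : Int) :
    ((PySem.List.enumerate ws s).filter (fun p => PySem.Str.isIn "univers" p.2)).map (fun p => p.1)
    = ((List.range ws.length).filter (mWc ws)).map (fun (i : Nat) => s + (i : Int)) := by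
  induction ws generalizing s with
  | nil => simp [PySem.List.enumerate]
  | cons w ws ih =>
    rw [PySem.List.enumerate_cons, List.length_cons, range_filter_cons, List.filter_cons]
    simp only [List.map_append, List.map_map]
    have htail : ((PySem.List.enumerate ws (s + 1)).filter (fun p => PySem.Str.isIn "univers" p.2)).map (fun p => p.1)
        = (((List.range ws.length).filter (mWc ws)).map (fun i => i + 1)).map (fun (i : Nat) => s + (i : Int)) := by
      rw [ih, List.map_map]
      apply List.map_congr_left
      intro i _
      simp [Function.comp]
      push_cast
      ring
    by_cases h : PySem.Str.isIn "univers" w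
    · have h0 : mWc (w :: ws) 0 = true := by simpa [mWc] using h
      simp only [h, h0, decide_true, if_true, List.map_cons, List.filter_cons, htail]
      simp
    · have h0 : mWc (w :: ws) 0 = false := by simpa [mWc] using h
      simp only [h, h0, decide_false, List.filter_cons, Bool.false_eq_true, if_false, List.nil_append, htail]
      simp


lemma take_one_drop (ws : List String) (k : Nat) (hk : k < ws.length) :
    (ws.drop k).take 1 = [ws.getD k ""] := by
  have := take_append_getD "" ws k k (le_refl k) hk
  simpa using this.symm

lemma open_succ (ws : List String) (rn k : Nat) :
    openS ws rn (k+1)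
      = ((List.range k).filter (fun i => mWc ws i && decide (k + 1 ≤ i + rn))).map
          (fun (i : Nat) =>
            let lo : Nat := i - rn
            ((rn : Int) - ((k+1 : Nat) : Int) + 1 + (i : Int), (ws.drop lo).take (k + 1 - lo)))
        ++ (if mWc ws k && decide (k + 1 ≤ k + rn) then
            [((rn : Int) - ((k+1 : Nat) : Int) + 1 + (k : Int), (ws.drop (k - rn)).take (k + 1 - (k - rn)))] else []) := by
  unfold openS
  rw [List.range_succ, List.filter_append, List.map_append]
  congr 1
  by_cases hm : mWc ws k <;> by_cases hr : 1 ≤ rn <;> simp [hm, hr] <;> omega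

lemma res_succ (ws : List String) (rn k : Nat) :
    resS ws rn (k+1)
      = ((List.range k).filter (fun i => mWc ws i && decide (i + rn < k))).map (winN ws rn)
        ++ ((List.range k).filter (fun i => mWc ws i && decide (k ≤ i + rn) && !decide (k + 1 ≤ i + rn))).map (winN ws rn)
        ++ (if mWc ws k && decide (k + rn < k + 1) then [winN ws rn k] else []) := by
  unfold resS
  rw [List.range_succ, List.filter_append, List.map_append]
  congr 1
  · have hsplit := filter_split_mono (List.range k) List.pairwise_lt_range
        (fun i => mWc ws i && decide (i + rn < k + 1)) (fun i => decide (i + rn < k))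
        (by intro a b hab hb; simp at hb ⊢; omega)
    rw [hsplit, List.map_append]
    congr 1
    · congr 1
      apply List.filter_congr
      intro i hi
      cases hm : mWc ws i <;> simp [hm] <;> omega
    · congr 1
      apply List.filter_congr
      intro i hi
      cases hm : mWc ws i
      · simp [hm]
      · simp only [hm, Bool.true_and]
        rw [Bool.eq_iff_iff]
        simp
        omega
  · by_cases hm : mWc ws k <;> by_cases hr : rn = 0 <;> simp [hm, hr] <;> omega

lemma still_eq (ws : List String) (rn k : Nat) (hk : k < ws.length) :
    ((openS ws rn k).filter (fun p => decide (1 < p.1))).map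
        (fun p => (p.1 - 1, p.2 ++ [ws.getD k ""]))
    = ((List.range k).filter (fun i => mWc ws i && decide (k + 1 ≤ i + rn))).map
        (fun (i : Nat) =>
          let lo : Nat := i - rn
          ((rn : Int) - ((k+1 : Nat) : Int) + 1 + (i : Int), (ws.drop lo).take (k + 1 - lo))) := by
  unfold openS
  rw [List.filter_map, List.map_map, List.filter_filter]
  simp only [Function.comp_apply]
  have hc : ∀ i ∈ List.range k,
      (decide (1 < (rn : Int) - (k : Int) + 1 + (i : Int)) && (mWc ws i && decide (k ≤ i + rn)))
      = (mWc ws i && decide (k + 1 ≤ i + rn)) := by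
    intro i hi
    cases hm : mWc ws i
    · simp [hm]
    · simp only [hm, Bool.true_and, Bool.and_true]
      rw [Bool.eq_iff_iff]
      simp
      omega
  rw [List.filter_congr hc]
  apply List.map_congr_left
  intro i hi
  obtain ⟨hmem, _⟩ := List.mem_filter.mp hi
  have h1 : i < k := List.mem_range.mp hmem
  simp only [Function.comp_apply]
  refine Prod.ext ?_ ?_
  · push_cast
    ring
  · exact take_append_getD "" ws (i - rn) k (by omega) hk

lemma closed_eq (ws : List String) (rn k : Nat) (hk : k < ws.length) :
    ((openS ws rn k).filter (fun p => !decide (1 < p.1))).map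
        (fun p => PySem.Str.join " " (p.2 ++ [ws.getD k ""]))
    = ((List.range k).filter (fun i => mWc ws i && decide (k ≤ i + rn) && !decide (k + 1 ≤ i + rn))).map (winN ws rn) := by
  unfold openS
  rw [List.filter_map, List.map_map, List.filter_filter]
  simp only [Function.comp_apply]
  have hc : ∀ i ∈ List.range k,
      (!decide (1 < (rn : Int) - (k : Int) + 1 + (i : Int)) && (mWc ws i && decide (k ≤ i + rn)))
      = (mWc ws i && decide (k ≤ i + rn) && !decide (k + 1 ≤ i + rn)) := by
    intro i hi
    cases hm : mWc ws i
    · simp [hm]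
    · simp only [hm, Bool.true_and, Bool.and_true]
      rw [Bool.eq_iff_iff]
      simp
      omega
  rw [List.filter_congr hc]
  apply List.map_congr_left
  intro i hi
  obtain ⟨hmem, hcond⟩ := List.mem_filter.mp hi
  have h1 : i < k := List.mem_range.mp hmem
  have h2 : i + rn = k := by
    simp at hcond
    omega
  simp only [Function.comp_apply]
  unfold winN
  have h3 : min (i + rn) ws.length + 1 - (i - rn) = k + 1 - (i - rn) := by omega
  rw [h3, ← take_append_getD "" ws (i - rn) k (by omega) hk]

lemma back_succ (ws : List String) (rn k : Nat) (hk : k < ws.length) :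
    backS ws rn k ++ [ws.getD k ""] = (ws.drop (k - rn)).take (k + 1 - (k - rn)) :=
  take_append_getD "" ws (k - rn) k (by omega) hk

lemma back3_eq (ws : List String) (rn k : Nat) (hk : k < ws.length) :
    (if (rn : Int) < (((ws.drop (k - rn)).take (k + 1 - (k - rn))).length : Int)
     then ((ws.drop (k - rn)).take (k + 1 - (k - rn))).drop 1
     else (ws.drop (k - rn)).take (k + 1 - (k - rn)))
    = backS ws rn (k+1) := by
  have hlen : ((ws.drop (k - rn)).take (k + 1 - (k - rn))).length = k + 1 - (k - rn) := by
    simp only [List.length_take, List.length_drop]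
    omega
  rw [hlen]
  by_cases hr : rn ≤ k
  · rw [if_pos (by omega), List.drop_take, List.drop_drop]
    unfold backS
    congr 1
    · omega
    · congr 1
      omega
  · rw [if_neg (by omega)]
    unfold backS
    congr 1
    · omega
    · congr 1
      omega

lemma winN_zero (ws : List String) (k : Nat) (hk : k < ws.length) :
    winN ws 0 k = ws.getD k "" := by
  unfold winN
  have h1 : min (k + 0) ws.length + 1 - (k - 0) = 1 := by omega
  have h2 : k - 0 = k := by omega
  rw [h1, h2, take_one_drop ws k hk]
  simp [PySem.Str.join]

lemma step_spec (ws : List String) (rn k : Nat) (hk : k < ws.length) :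
    stepB (rn : Int) (resS ws rn k, backS ws rn k, openS ws rn k) (ws.getD k "")
      = (resS ws rn (k+1), backS ws rn (k+1), openS ws rn (k+1)) := by
  simp only [stepB]
  rw [inner_fold, still_eq ws rn k hk, closed_eq ws rn k hk]
  rw [show PySem.Str.isIn "univers" (ws.getD k "") = mWc ws k from rfl]
  rw [back_succ ws rn k hk, back3_eq ws rn k hk]
  rw [open_succ ws rn k, res_succ ws rn k]
  by_cases hm : mWc ws k
  · by_cases hr : (0 : Int) < (rn : Int)
    · rw [if_pos hm, if_pos hr]
      have hif : (mWc ws k && decide (k + 1 ≤ k + rn)) = true := by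
        simp [hm]
        omega
      have hif2 : (mWc ws k && decide (k + rn < k + 1)) = false := by
        simp [hm]
        omega
      simp only [hif, hif2, if_true, if_false, Bool.false_eq_true]
      refine Prod.ext ?_ (Prod.ext ?_ ?_)
      · simp
        rfl
      · rfl
      · simp only []
        congr 1
        congr 1
        refine Prod.ext ?_ rfl
        push_cast
        ring
    · have hrn : rn = 0 := by omega
      subst hrn
      rw [if_pos hm, if_neg hr]
      have hif : (mWc ws k && decide (k + 1 ≤ k + 0)) = false := by
        simp
      have hif2 : (mWc ws k && decide (k + 0 < k + 1)) = true := by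
        simp [hm]
      simp only [hif, hif2, if_true, if_false, Bool.false_eq_true]
      refine Prod.ext ?_ (Prod.ext ?_ ?_)
      · simp [winN_zero ws k hk]
        rfl
      · rfl
      · simp
  · rw [if_neg (by simp [hm])]
    have hif : (mWc ws k && decide (k + 1 ≤ k + rn)) = false := by
      simp [hm]
    have hif2 : (mWc ws k && decide (k + rn < k + 1)) = false := by
      simp [hm]
    simp only [hif, hif2, if_false, Bool.false_eq_true]
    refine Prod.ext ?_ (Prod.ext ?_ ?_)
    · simp
      rfl
    · rfl
    · simp

lemma state_zero (ws : List String) (rn : Nat) :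
    (resS ws rn 0, backS ws rn 0, openS ws rn 0)
      = (([], [], []) : List String × List String × List (Int × List String)) := by
  simp [resS, backS, openS]

lemma loop_spec (ws : List String) (rn : Nat) (t : List String) :
    ∀ (k : Nat), t = ws.drop k → k ≤ ws.length →
      t.foldl (stepB (rn : Int)) (resS ws rn k, backS ws rn k, openS ws rn k)
        = (resS ws rn ws.length, backS ws rn ws.length, openS ws rn ws.length) := by
  induction t with
  | nil =>
    intro k ht hk
    have hlen := congrArg List.length ht
    simp only [List.length_nil, List.length_drop] at hlen
    have hkn : k = ws.length := by omega
    subst hkn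
    simp
  | cons w t ih =>
    intro k ht hk
    have hlen := congrArg List.length ht
    simp only [List.length_cons, List.length_drop] at hlen
    have hlt : k < ws.length := by omega
    have h0 : ws[k]? = some w := by
      have h1 : (ws.drop k)[0]? = some w := by
        rw [← ht]
        simp
      rw [List.getElem?_drop, Nat.add_zero] at h1
      exact h1
    have hw : ws.getD k "" = w := by
      simp [List.getD_eq_getElem?_getD, h0]
    have ht' : t = ws.drop (k + 1) := by
      have h2 := congrArg List.tail ht
      simpa [List.tail_drop] using h2
    rw [List.foldl_cons, ← hw, step_spec ws rn k hlt]
    exact ih (k + 1) ht' (by omega)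

lemma final_eq (ws : List String) (rn : Nat) :
    resS ws rn ws.length ++ (openS ws rn ws.length).map (fun p => PySem.Str.join " " p.2)
    = ((List.range ws.length).filter (mWc ws)).map (winN ws rn) := by
  rw [filter_split_mono (List.range ws.length) List.pairwise_lt_range (mWc ws)
      (fun i => decide (i + rn < ws.length))
      (by intro a b hab hb; simp at hb ⊢; omega), List.map_append]
  congr 1
  unfold openS
  rw [List.map_map]
  have hc : ∀ i ∈ List.range ws.length,
      (mWc ws i && decide (ws.length ≤ i + rn)) = (mWc ws i && !decide (i + rn < ws.length)) := by
    intro i hi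
    cases hm : mWc ws i
    · simp [hm]
    · simp only [hm, Bool.true_and]
      rw [Bool.eq_iff_iff]
      simp
  rw [List.filter_congr hc]
  apply List.map_congr_left
  intro i hi
  obtain ⟨hmem, hcond⟩ := List.mem_filter.mp hi
  have h1 : i < ws.length := List.mem_range.mp hmem
  have h2 : ws.length ≤ i + rn := by
    simp at hcond
    omega
  simp only [Function.comp_apply]
  unfold winN
  rw [List.take_of_length_le (by simp only [List.length_drop]; omega),
    List.take_of_length_le (by simp only [List.length_drop]; omega)]

lemma mem_enumerate_snd {p : Int × String} {ws : List String} {s : Int}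
    (hp : p ∈ PySem.List.enumerate ws s) : p.2 ∈ ws := by
  have h := List.mem_map_of_mem (f := Prod.snd) hp
  rwa [PySem.List.map_snd_enumerate] at h

lemma no_match_loop (r : Int) (ws : List String)
    (h : ∀ w ∈ ws, PySem.Str.isIn "univers" w = false) :
    ∀ back, (ws.foldl (stepB r) ([], back, [])).1 = []
      ∧ (ws.foldl (stepB r) ([], back, [])).2.2 = [] := by
  induction ws with
  | nil => intro back; exact ⟨rfl, rfl⟩
  | cons w ws ih =>
    intro back
    have hw : PySem.Str.isIn "univers" w = false := h w (List.mem_cons_self ..)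
    have hw2 : PySem.Chars.isIn ['u','n','i','v','e','r','s'] w.toList = false := by simpa using hw
    have hstep : stepB r ([], back, []) w
        = ([], if r < ((back ++ [w]).length : Int) then (back ++ [w]).drop 1 else back ++ [w], []) := by
      simp [stepB, hw2]
    rw [List.foldl_cons, hstep]
    exact ih (fun w' hw' => h w' (List.mem_cons_of_mem _ hw')) _

-- ===== VERDICT (by name: the statement is the Claim_ definition above) =====
theorem str_radius_u_spec : Claim_equal_str_radius_u := by
  intro string radius_u hdom hpre
  unfold Spec_str_radius_u
  rcases hpre with hpre | hnm
  case inr =>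
    unfold str_radius_u str_radius_u_alt
    simp only [PySem.List.foldl_append_if, List.nil_append]
    have hA : (PySem.List.enumerate (PySem.Str.split₀ string) 0).filter
        (fun p => PySem.Str.isIn "univers" p.2) = [] := by
      apply List.filter_eq_nil_iff.mpr
      intro p hp
      simpa using hnm p.2 (mem_enumerate_snd hp)
    rw [hA]
    obtain ⟨h1, h2⟩ := no_match_loop radius_u (PySem.Str.split₀ string) hnm []
    simp [h1, h2]
  obtain ⟨rn, hrn⟩ : ∃ rn : Nat, radius_u = (rn : Int) :=
    ⟨radius_u.toNat, (Int.toNat_of_nonneg hpre).symm⟩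
  subst hrn
  unfold str_radius_u str_radius_u_alt
  simp only [PySem.List.foldl_append_if, PySem.List.foldl_append_singleton_eq_map,
    List.nil_append]
  rw [enum_matches (PySem.Str.split₀ string) 0, List.map_map]
  have hB : (PySem.Str.split₀ string).foldl (stepB (rn : Int))
        (([], [], []) : List String × List String × List (Int × List String))
      = (resS (PySem.Str.split₀ string) rn (PySem.Str.split₀ string).length,
         backS (PySem.Str.split₀ string) rn (PySem.Str.split₀ string).length,
         openS (PySem.Str.split₀ string) rn (PySem.Str.split₀ string).length) := by
    rw [← state_zero (PySem.Str.split₀ string) rn]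
    exact loop_spec (PySem.Str.split₀ string) rn (PySem.Str.split₀ string) 0 (by simp) (by omega)
  rw [hB]
  rw [final_eq (PySem.Str.split₀ string) rn]
  apply List.map_congr_left
  intro i hi
  obtain ⟨hmem, hcond⟩ := List.mem_filter.mp hi
  have h1 : i < (PySem.Str.split₀ string).length := List.mem_range.mp hmem
  simp only [Function.comp_apply]
  have hs := PySem.List.slice_toNat (xs := PySem.Str.split₀ string)
      (a := max 0 (0 + (i : Int) - (rn : Int)))
      (b := min (0 + (i : Int) + (rn : Int)) ((PySem.Str.split₀ string).length : Int) + 1)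
      (by omega) (by omega)
  rw [hs]
  unfold winN
  congr 1
  congr 1
  · omega
  · congr 1
    omega
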